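-- pv_equiv track=rewrite | github.com/nageih/MC-Eternal-2 | tool/backfill.py | _split_value_segments
-- ===== SOURCE A (Python) =====
-- from typing import Dict, Iterable, List, Sequence, Tuple, Optional
--
-- def _split_value_segments(value: str) -> List[str]:
--     if "\n" not in value:
--         return [value]
--
--     parts = value.split('\n')
--     segments: List[str] = []
--     idx = 0
--     length = len(parts)
--
--     while idx < length:
--         part = parts[idx]
--         if part != '':
--             segments.append(part)
--             idx += 1
--             continue
--
--         run_start = idx
--         while idx < length and parts[idx] == '':
--             idx += 1
--         blank_run = idx - run_start
--         blanks_to_add = (blank_run + 1) // 2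
--         segments.extend([''] * blanks_to_add)
--
--     if not segments:
--         return ['']
--
--     return segments
-- ===== SOURCE B (Python) =====
-- from typing import List
--
-- def _split_value_segments(value: str) -> List[str]:
--     # One-pass fold over the newline-split parts: count pending blanks, flush ceil(run/2) blanks before each
--     # non-blank part and once at the end.
--     segments: List[str] = []
--     blanks = 0
--     for part in value.split('\n'):
--         if part == '':
--             blanks += 1
--         else:
--             segments.extend([''] * ((blanks + 1) // 2))
--             segments.append(part)
--             blanks = 0
--     segments.extend([''] * ((blanks + 1) // 2))
--     return segments
-- ===== Notes on version B (the rewrite author's own statement) =====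
-- stated objective: simpler
-- what changed: Replaced the index-driven while loop with a nested blank-run-skipping while and two redundant guards by a single fold over the newline-split parts that keeps a pending-blank counter and flushes ceil(run/2) blanks before each non-blank part and once at the end.
import Mathlib
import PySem

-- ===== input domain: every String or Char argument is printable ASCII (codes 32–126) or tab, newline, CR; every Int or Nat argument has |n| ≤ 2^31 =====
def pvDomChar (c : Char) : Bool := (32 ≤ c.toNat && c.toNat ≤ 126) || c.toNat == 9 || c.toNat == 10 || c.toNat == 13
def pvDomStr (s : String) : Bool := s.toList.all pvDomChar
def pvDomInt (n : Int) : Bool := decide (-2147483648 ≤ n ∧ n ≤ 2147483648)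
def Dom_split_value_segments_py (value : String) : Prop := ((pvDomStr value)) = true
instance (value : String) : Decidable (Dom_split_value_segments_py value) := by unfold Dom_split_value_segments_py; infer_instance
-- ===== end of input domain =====

-- B replaces A's index/inner-while structure by a single fold with a pending-blank counter (simpler); same return value.

-- ===== PORT A =====
-- inner while loop of A: skip the run of '' parts, returning (run length, rest)
def aSkipBlanks : List String → Nat × List String
  | [] => (0, [])
  | p :: rest =>
    if p = "" then
      let r := aSkipBlanks rest
      (r.1 + 1, r.2)
    else (0, p :: rest)

theorem aSkipBlanks_len_le : ∀ (xs : List String), (aSkipBlanks xs).2.length ≤ xs.length := by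
  intro xs
  induction xs with
  | nil => simp [aSkipBlanks]
  | cons p rest ih =>
    simp only [aSkipBlanks]
    split
    · exact le_trans ih (Nat.le_succ _)
    · exact le_refl _

-- A's outer while loop over the suffix of parts starting at idx
def aLoop : List String → List String
  | [] => []
  | p :: rest =>
    if p = "" then
      -- blank_run = 1 + blanks skipped in rest; extend with (blank_run + 1) // 2 blanks
      List.replicate (((aSkipBlanks rest).1 + 1 + 1) / 2) "" ++ aLoop (aSkipBlanks rest).2
    else
      p :: aLoop rest
termination_by xs => xs.length
decreasing_by
  · exact Nat.lt_succ_of_le (aSkipBlanks_len_le rest)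
  · simp

def split_value_segments_py (value : String) : List String :=
  if PySem.Str.isIn "\n" value = false then [value]
  else
    let parts := (PySem.Str.split? value "\n").getD []
    let segments := aLoop parts
    if segments = [] then [""] else segments

-- ===== PORT B =====
def bStep (st : List String × Nat) (part : String) : List String × Nat :=
  if part = "" then (st.1, st.2 + 1)
  else (st.1 ++ List.replicate ((st.2 + 1) / 2) "" ++ [part], 0)

def split_value_segments_py_alt (value : String) : List String :=
  let st := ((PySem.Str.split? value "\n").getD []).foldl bStep ([], 0)
  st.1 ++ List.replicate ((st.2 + 1) / 2) ""

-- ===== PRECONDITION & SPEC =====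
def Spec_split_value_segments_py (value : String) (out : List String) : Prop := out = split_value_segments_py_alt value
instance (value : String) (out : List String) : Decidable (Spec_split_value_segments_py value out) := by unfold Spec_split_value_segments_py; infer_instance

-- ===== CLAIM (what is proved, stated in full; the proofs are below) =====
def Claim_equal_split_value_segments_py : Prop := ∀ (value : String), Dom_split_value_segments_py value → Spec_split_value_segments_py value (split_value_segments_py value)

-- ===== LEMMAS AND PROOFS =====

theorem foldl_bStep_blank (acc : List String) (m : Nat) (rest : List String) :
    List.foldl bStep (acc, m) ("" :: rest) = List.foldl bStep (acc, m + 1) rest := by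
  simp [bStep]

theorem foldl_bStep_nonblank (p : String) (hp : p ≠ "") (acc : List String) (m : Nat)
    (rest : List String) :
    List.foldl bStep (acc, m) (p :: rest)
      = List.foldl bStep (acc ++ List.replicate ((m + 1) / 2) "" ++ [p], 0) rest := by
  simp [bStep, hp]

-- aLoop restated through aSkipBlanks (covers both head shapes)
theorem aLoop_eq_skip (xs : List String) :
    aLoop xs = List.replicate (((aSkipBlanks xs).1 + 1) / 2) "" ++ aLoop (aSkipBlanks xs).2 := by
  cases xs with
  | nil => simp [aSkipBlanks, aLoop]
  | cons p rest =>
    by_cases hp : p = ""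
    · subst hp; simp [aSkipBlanks, aLoop]
    · simp [aSkipBlanks, aLoop, hp]

-- main loop correspondence: B's fold state vs A's run-skipping loop
theorem fold_eq_aLoop : ∀ (xs acc : List String) (m : Nat),
    (xs.foldl bStep (acc, m)).1 ++ List.replicate (((xs.foldl bStep (acc, m)).2 + 1) / 2) ""
      = acc ++ List.replicate ((m + (aSkipBlanks xs).1 + 1) / 2) "" ++ aLoop (aSkipBlanks xs).2 := by
  intro xs
  induction xs with
  | nil => intro acc m; simp [aSkipBlanks, aLoop]
  | cons p rest ih =>
    intro acc m
    by_cases hp : p = ""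
    · subst hp
      rw [foldl_bStep_blank, ih acc (m + 1)]
      simp only [aSkipBlanks, reduceIte]
      have harith : m + 1 + (aSkipBlanks rest).1 + 1 = m + ((aSkipBlanks rest).1 + 1) + 1 := by omega
      rw [harith]
    · rw [foldl_bStep_nonblank p hp, ih _ 0]
      simp only [aSkipBlanks, if_neg hp]
      rw [show aLoop (p :: rest) = p :: aLoop rest from by simp [aLoop, hp],
          aLoop_eq_skip rest]
      simp [List.append_assoc]

theorem alt_eq_aLoop (value : String) :
    split_value_segments_py_alt value = aLoop ((PySem.Str.split? value "\n").getD []) := by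
  unfold split_value_segments_py_alt
  have h := fold_eq_aLoop ((PySem.Str.split? value "\n").getD []) [] 0
  simp only [List.nil_append, Nat.zero_add] at h
  rw [h, ← aLoop_eq_skip]

-- aLoop of a nonempty list is nonempty
theorem aLoop_ne_nil (xs : List String) (h : xs ≠ []) : aLoop xs ≠ [] := by
  cases xs with
  | nil => exact absurd rfl h
  | cons p rest =>
    by_cases hp : p = ""
    · subst hp
      simp only [aLoop, reduceIte]
      intro hc
      rw [List.append_eq_nil_iff, List.replicate_eq_nil_iff] at hc
      omega
    · simp [aLoop, hp]

-- splitOn.go with no separator occurrence returns a single segment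
theorem splitOn_go_no_sep : ∀ (fuel : Nat) (l cur : List Char) (acc : List (List Char)),
    '\n' ∉ l →
    PySem.Chars.splitOn.go ['\n'] fuel l cur acc = ((cur.reverse ++ l) :: acc).reverse := by
  intro fuel
  induction fuel with
  | zero => intro l cur acc _; simp [PySem.Chars.splitOn.go]
  | succ n ih =>
    intro l cur acc hmem
    cases l with
    | nil => simp [PySem.Chars.splitOn.go]
    | cons c rest =>
      have hc : c ≠ '\n' := fun h => hmem (h ▸ List.mem_cons_self)
      have hpre : List.isPrefixOf ['\n'] (c :: rest) = false := by
        simp [List.isPrefixOf]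
        exact fun h => absurd h.symm hc
      simp only [PySem.Chars.splitOn.go, hpre]
      rw [ih rest (c :: cur) acc (fun h => hmem (List.mem_cons_of_mem _ h))]
      simp

-- splitOn.go always returns a nonempty list
theorem splitOn_go_ne_nil : ∀ (fuel : Nat) (l cur : List Char) (acc : List (List Char)),
    PySem.Chars.splitOn.go ['\n'] fuel l cur acc ≠ [] := by
  intro fuel
  induction fuel with
  | zero => intro l cur acc; simp [PySem.Chars.splitOn.go]
  | succ n ih =>
    intro l cur acc
    cases l with
    | nil => simp [PySem.Chars.splitOn.go]
    | cons c rest =>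
      simp only [PySem.Chars.splitOn.go]
      split
      · exact ih _ _ _
      · exact ih _ _ _

theorem chars_split_eq (value : String) :
    PySem.Chars.split? value.toList ['\n']
      = some (PySem.Chars.splitOn.go ['\n'] (value.toList.length + 1) value.toList [] []) := by
  simp [PySem.Chars.split?, PySem.Chars.splitOn]

theorem parts_ne_nil (value : String) : (PySem.Str.split? value "\n").getD [] ≠ [] := by
  have hmap := PySem.Str.split?_map value "\n"
  rw [show ("\n" : String).toList = ['\n'] from rfl, chars_split_eq] at hmap
  cases hsp : PySem.Str.split? value "\n" with
  | none => rw [hsp] at hmap; simp at hmap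
  | some xs =>
    rw [hsp] at hmap
    simp only [Option.map_some, Option.some.injEq] at hmap
    intro hc
    simp only [Option.getD_some] at hc
    rw [hc] at hmap
    exact splitOn_go_ne_nil _ _ _ _ (by simpa using hmap.symm)

theorem parts_no_sep (value : String) (h : PySem.Str.isIn "\n" value = false) :
    (PySem.Str.split? value "\n").getD [] = [value] := by
  have hmem : '\n' ∉ value.toList := by
    intro hm
    have hin : PySem.Str.isIn "\n" value = true := by
      rw [PySem.Str.isIn_iff_infix]
      exact (List.singleton_infix_iff _ _).mpr hm
    rw [h] at hin; exact Bool.false_ne_true hin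
  have hmap := PySem.Str.split?_map value "\n"
  rw [show ("\n" : String).toList = ['\n'] from rfl, chars_split_eq,
      splitOn_go_no_sep _ _ _ _ hmem] at hmap
  simp only [List.reverse_cons, List.reverse_nil, List.nil_append] at hmap
  cases hsp : PySem.Str.split? value "\n" with
  | none => rw [hsp] at hmap; simp at hmap
  | some xs =>
    rw [hsp] at hmap
    simp only [Option.map_some, Option.some.injEq] at hmap
    cases xs with
    | nil => simp at hmap
    | cons y ys =>
      cases ys with
      | nil =>
        simp only [List.map_cons, List.map_nil] at hmap
        have hy : y.toList = value.toList := by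
          have := List.head_eq_of_cons_eq hmap
          simpa using this
        simp [String.toList_inj.mp hy]
      | cons z zs => simp at hmap

-- ===== VERDICT (by name: the statement is the Claim_ definition above) =====
theorem split_value_segments_py_spec : Claim_equal_split_value_segments_py := by
  intro value _
  unfold Spec_split_value_segments_py
  rw [alt_eq_aLoop]
  unfold split_value_segments_py
  by_cases h : PySem.Str.isIn "\n" value = false
  · rw [if_pos h, parts_no_sep value h]
    by_cases hv : value = ""
    · subst hv; simp [aLoop, aSkipBlanks]
    · simp [aLoop, hv]
  · rw [if_neg h]
    have hne := aLoop_ne_nil _ (parts_ne_nil value)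
    simp [if_neg hne]
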